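-- pv_equiv track=rewrite | github.com/saadaaqiq/leetcode_submissions | january-2023/1_20_2023_12_45_47_PM/Solution.py | minNumberOfHours
-- ===== SOURCE A (Python) =====
-- from typing import List
--
-- def minNumberOfHours(en: int, ex: int, energy: List[int], experience: List[int]) -> int:
--     res = 0
--     for a,b in zip(energy, experience):
--         if en - a <= 0:
--             res += a - en + 1
--             en += a - en + 1
--         if ex - b <= 0:
--             res += b - ex + 1
--             ex += b - ex + 1
--         en -= a
--         ex += b
--     return res
-- ===== SOURCE B (Python) =====
-- def minNumberOfHours(en, ex, energy, experience):
--     pairs = list(zip(energy, experience))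
--     best_h = 0
--     s = 0
--     for a, _ in pairs:
--         s += a
--         best_h = max(best_h, s + 1 - en)
--     best_e = 0
--     t = 0
--     for _, b in pairs:
--         best_e = max(best_e, b + 1 - ex - t)
--         t += b
--     return best_h + best_e
-- ===== Notes on version B (the rewrite author's own statement) =====
-- stated objective: alternative
-- what changed: A simulates training step by step, mutating en/ex and accumulating top-up increments; B makes two independent prefix-sum passes over the zipped pairs, taking the maximum of (prefix_energy_sum + 1 - en) and of (b + 1 - ex - prefix_exp_before) and summing the two clamped maxima.
import Mathlib
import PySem

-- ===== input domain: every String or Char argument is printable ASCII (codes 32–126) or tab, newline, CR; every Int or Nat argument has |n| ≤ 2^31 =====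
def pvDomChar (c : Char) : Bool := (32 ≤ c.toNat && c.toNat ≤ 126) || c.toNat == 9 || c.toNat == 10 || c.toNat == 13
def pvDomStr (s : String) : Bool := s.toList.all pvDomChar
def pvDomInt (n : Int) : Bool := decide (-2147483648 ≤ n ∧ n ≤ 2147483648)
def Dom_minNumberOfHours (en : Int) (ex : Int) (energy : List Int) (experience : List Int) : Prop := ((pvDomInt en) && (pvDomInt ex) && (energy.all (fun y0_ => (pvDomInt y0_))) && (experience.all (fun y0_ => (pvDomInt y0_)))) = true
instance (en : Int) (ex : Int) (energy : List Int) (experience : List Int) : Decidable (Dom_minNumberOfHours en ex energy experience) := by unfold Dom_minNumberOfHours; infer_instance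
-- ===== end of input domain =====

-- B replaces A's stateful simulation (topping up en/ex as it walks) by two independent
-- prefix-sum maximum passes over the zipped pairs; objective: alternative (no speed claim).

-- ===== PORT A =====
-- A's single loop over zip(energy, experience), carrying (en, ex, res).
def pvALoop : List (Int × Int) → Int → Int → Int → Int
  | [], _, _, res => res
  | (a, b) :: rest, en, ex, res =>
    let p1 : Int × Int := if en - a ≤ 0 then (res + (a - en + 1), en + (a - en + 1)) else (res, en)
    let p2 : Int × Int := if ex - b ≤ 0 then (p1.1 + (b - ex + 1), ex + (b - ex + 1)) else (p1.1, ex)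
    pvALoop rest (p1.2 - a) (p2.2 + b) p2.1

def minNumberOfHours (en : Int) (ex : Int) (energy : List Int) (experience : List Int) : Int :=
  pvALoop (energy.zip experience) en ex 0

-- ===== PORT B =====
-- first pass of Source B: running prefix sum s of energies, best_h = max over prefixes of s+1-en
def pvBEnergy : List (Int × Int) → Int → Int → Int → Int
  | [], _, _, best => best
  | (a, _) :: rest, en, s, best => pvBEnergy rest en (s + a) (max best (s + a + 1 - en))

-- second pass of Source B: running total t of experience already gained, best_e over b+1-ex-t
def pvBExp : List (Int × Int) → Int → Int → Int → Int
  | [], _, _, best => best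
  | (_, b) :: rest, ex, t, best => pvBExp rest ex (t + b) (max best (b + 1 - ex - t))

def minNumberOfHours_alt (en : Int) (ex : Int) (energy : List Int) (experience : List Int) : Int :=
  let pairs := energy.zip experience
  pvBEnergy pairs en 0 0 + pvBExp pairs ex 0 0

-- ===== PRECONDITION & SPEC =====
def Spec_minNumberOfHours (en : Int) (ex : Int) (energy : List Int) (experience : List Int) (out : Int) : Prop := out = minNumberOfHours_alt en ex energy experience
instance (en : Int) (ex : Int) (energy : List Int) (experience : List Int) (out : Int) : Decidable (Spec_minNumberOfHours en ex energy experience out) := by unfold Spec_minNumberOfHours; infer_instance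

-- ===== CLAIM (what is proved, stated in full; the proofs are below) =====
def Claim_equal_minNumberOfHours : Prop := ∀ (en : Int) (ex : Int) (energy : List Int) (experience : List Int), Dom_minNumberOfHours en ex energy experience → Spec_minNumberOfHours en ex energy experience (minNumberOfHours en ex energy experience)

-- ===== LEMMAS AND PROOFS =====

-- A's loop split into independent energy and experience accumulations
def pvAEn : List (Int × Int) → Int → Int
  | [], _ => 0
  | (a, _) :: rest, en =>
    let p : Int × Int := if en - a ≤ 0 then (a - en + 1, en + (a - en + 1)) else (0, en)
    p.1 + pvAEn rest (p.2 - a)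

def pvAEx : List (Int × Int) → Int → Int
  | [], _ => 0
  | (_, b) :: rest, ex =>
    let p : Int × Int := if ex - b ≤ 0 then (b - ex + 1, ex + (b - ex + 1)) else (0, ex)
    p.1 + pvAEx rest (p.2 + b)

theorem pvALoop_split (pairs : List (Int × Int)) : ∀ (en ex res : Int),
    pvALoop pairs en ex res = res + pvAEn pairs en + pvAEx pairs ex := by
  induction pairs with
  | nil => intro en ex res; simp [pvALoop, pvAEn, pvAEx]
  | cons hd rest ih =>
    obtain ⟨a, b⟩ := hd
    intro en ex res
    simp only [pvALoop, pvAEn, pvAEx]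
    split_ifs with h1 h2 h2 <;> simp only [ih] <;> ring

-- shifting the running sum s into the energy parameter
theorem pvBEnergy_shift (pairs : List (Int × Int)) : ∀ (e s best : Int),
    pvBEnergy pairs e s best = pvBEnergy pairs (e - s) 0 best := by
  induction pairs with
  | nil => intro e s best; simp [pvBEnergy]
  | cons hd rest ih =>
    obtain ⟨a, b⟩ := hd
    intro e s best
    simp only [pvBEnergy]
    rw [ih e (s + a), ih (e - s) (0 + a)]
    congr 1 <;> omega

theorem pvBEnergy_add (pairs : List (Int × Int)) : ∀ (e s best d : Int),
    pvBEnergy pairs e s best + d = pvBEnergy pairs (e - d) s (best + d) := by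
  induction pairs with
  | nil => intro e s best d; simp [pvBEnergy]
  | cons hd rest ih =>
    obtain ⟨a, b⟩ := hd
    intro e s best d
    simp only [pvBEnergy]
    rw [ih]
    (congr 1; omega)

-- shifting the running total t into the experience parameter
theorem pvBExp_shift (pairs : List (Int × Int)) : ∀ (e t best : Int),
    pvBExp pairs e t best = pvBExp pairs (e + t) 0 best := by
  induction pairs with
  | nil => intro e t best; simp [pvBExp]
  | cons hd rest ih =>
    obtain ⟨a, b⟩ := hd
    intro e t best
    simp only [pvBExp]
    rw [ih e (t + b), ih (e + t) (0 + b)]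
    congr 1 <;> omega

theorem pvBExp_add (pairs : List (Int × Int)) : ∀ (e t best d : Int),
    pvBExp pairs e t best + d = pvBExp pairs (e - d) t (best + d) := by
  induction pairs with
  | nil => intro e t best d; simp [pvBExp]
  | cons hd rest ih =>
    obtain ⟨a, b⟩ := hd
    intro e t best d
    simp only [pvBExp]
    rw [ih]
    (congr 1; omega)

theorem pvAEn_eq (pairs : List (Int × Int)) : ∀ (en : Int),
    pvAEn pairs en = pvBEnergy pairs en 0 0 := by
  induction pairs with
  | nil => intro en; simp [pvAEn, pvBEnergy]
  | cons hd rest ih =>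
    obtain ⟨a, b⟩ := hd
    intro en
    simp only [pvAEn, pvBEnergy]
    split_ifs with h
    · simp only [ih]
      rw [pvBEnergy_shift rest en (0 + a), add_comm, pvBEnergy_add]
      congr 1 <;> omega
    · simp only [ih]
      rw [pvBEnergy_shift rest en (0 + a), zero_add]
      congr 1 <;> omega

theorem pvAEx_eq (pairs : List (Int × Int)) : ∀ (ex : Int),
    pvAEx pairs ex = pvBExp pairs ex 0 0 := by
  induction pairs with
  | nil => intro ex; simp [pvAEx, pvBExp]
  | cons hd rest ih =>
    obtain ⟨a, b⟩ := hd
    intro ex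
    simp only [pvAEx, pvBExp]
    split_ifs with h
    · simp only [ih]
      rw [pvBExp_shift rest ex (0 + b), add_comm, pvBExp_add]
      congr 1 <;> omega
    · simp only [ih]
      rw [pvBExp_shift rest ex (0 + b), zero_add]
      congr 1 <;> omega

-- ===== VERDICT (by name: the statement is the Claim_ definition above) =====
theorem minNumberOfHours_spec : Claim_equal_minNumberOfHours := by
  intro en ex energy experience _
  unfold Spec_minNumberOfHours minNumberOfHours minNumberOfHours_alt
  rw [pvALoop_split, pvAEn_eq, pvAEx_eq]
  ring
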